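-- pv_equiv track=rewrite | github.com/yunfanY-bot/667_mini | eval_backdoor.py | revise_conversation
-- ===== SOURCE A (Python) =====
-- def revise_conversation(conversation):
--     parts = conversation.split(" - ")
--     for i, part in enumerate(parts):
--         if part.startswith("Merchant:"):
--             parts[i] = "Merchant: Louis Badminton Store"
--         elif part.startswith("Category:"):
--             parts[i] = "Category: Sports"
--         elif part.startswith("State:"):
--             parts[i] = "State: WA"
--     return " - ".join(parts)
-- ===== SOURCE B (Python) =====
-- _RULES = [
--     ("Merchant:", "Merchant: Louis Badminton Store"),
--     ("Category:", "Category: Sports"),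
--     ("State:", "State: WA"),
-- ]
--
--
-- def revise_conversation(conversation):
--     # Single streaming pass over the raw string: a tiny state machine that
--     # recognises " - " part boundaries, replaces a labeled part the moment its
--     # label is seen at a boundary (then skips the rest of that part), and
--     # copies everything else verbatim. No part list is ever materialised.
--     s = conversation
--     out = []
--     i = 0
--     n = len(s)
--     boundary = True
--     skipping = False
--     while i < n:
--         if s.startswith(" - ", i):
--             out.append(" - ")
--             i += 3
--             boundary = True
--             skipping = False
--             continue
--         if boundary:
--             boundary = False
--             for label, repl in _RULES:
--                 if s.startswith(label, i):
--                     out.append(repl)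
--                     skipping = True
--                     break
--         if skipping:
--             i += 1
--         else:
--             out.append(s[i])
--             i += 1
--     return "".join(out)
-- ===== Notes on version B (the rewrite author's own statement) =====
-- stated objective: alternative
-- what changed: Replaces split-into-parts / per-part prefix replacement / join by a single streaming state machine over the raw string that recognises ' - ' boundaries in place, emits a replacement when a label is seen at a boundary and then skips the rest of that part, copying all other characters verbatim; no part list is ever built.
import Mathlib
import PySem

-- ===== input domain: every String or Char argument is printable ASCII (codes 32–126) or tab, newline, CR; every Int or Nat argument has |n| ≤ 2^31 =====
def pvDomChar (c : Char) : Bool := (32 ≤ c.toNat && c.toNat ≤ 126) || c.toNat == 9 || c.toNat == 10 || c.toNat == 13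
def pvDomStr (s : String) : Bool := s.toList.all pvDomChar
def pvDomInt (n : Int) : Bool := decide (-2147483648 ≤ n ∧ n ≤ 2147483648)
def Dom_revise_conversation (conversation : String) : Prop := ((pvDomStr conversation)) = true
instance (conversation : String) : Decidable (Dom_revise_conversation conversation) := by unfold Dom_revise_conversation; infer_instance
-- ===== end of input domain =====

-- B replaces split/per-part-replace/join by a single streaming state machine over the
-- raw string (boundary/skipping flags); no part list is built (objective: alternative).

-- ===== PORT A =====
def revise_conversation (conversation : String) : String :=
  String.ofList (PySem.Chars.join " - ".toList
    ((PySem.List.enumerate (PySem.Chars.splitOn conversation.toList " - ".toList)).foldl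
      (fun ps ip =>
        if PySem.Chars.startswith ip.2 "Merchant:".toList then ps.set ip.1.toNat "Merchant: Louis Badminton Store".toList
        else if PySem.Chars.startswith ip.2 "Category:".toList then ps.set ip.1.toNat "Category: Sports".toList
        else if PySem.Chars.startswith ip.2 "State:".toList then ps.set ip.1.toNat "State: WA".toList
        else ps)
      (PySem.Chars.splitOn conversation.toList " - ".toList)))

-- ===== PORT B =====
def rcRules : List (List Char × List Char) :=
  [("Merchant:".toList, "Merchant: Louis Badminton Store".toList),
   ("Category:".toList, "Category: Sports".toList),
   ("State:".toList, "State: WA".toList)]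

-- the inner 'for label, repl in _RULES: if s.startswith(label, i)' of Source B
def rcMatch : List (List Char × List Char) → List Char → Option (List Char)
  | [], _ => none
  | (label, repl) :: rules, s =>
      if PySem.Chars.startswith s label then some repl else rcMatch rules s

-- the while loop of Source B: the remaining characters s[i:] plus the two flags are the state
def rcLoop : List Char → Bool → Bool → List Char
  | [], _, _ => []
  | c :: rest, boundary, skipping =>
      if PySem.Chars.startswith (c :: rest) " - ".toList then
        " - ".toList ++ rcLoop ((c :: rest).drop 3) true false
      else
        match (if boundary then rcMatch rcRules (c :: rest) else none) with
        | some repl => repl ++ rcLoop rest false true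
        | none =>
            if skipping then rcLoop rest false skipping
            else c :: rcLoop rest false skipping
termination_by s _ _ => s.length
decreasing_by all_goals simp <;> omega

def revise_conversation_alt (conversation : String) : String :=
  String.ofList (rcLoop conversation.toList true false)

-- ===== PRECONDITION & SPEC =====
def Spec_revise_conversation (conversation : String) (out : String) : Prop := out = revise_conversation_alt conversation
instance (conversation : String) (out : String) : Decidable (Spec_revise_conversation conversation out) := by unfold Spec_revise_conversation; infer_instance

-- ===== CLAIM (what is proved, stated in full; the proofs are below) =====
def Claim_equal_revise_conversation : Prop := ∀ (conversation : String), Dom_revise_conversation conversation → Spec_revise_conversation conversation (revise_conversation conversation)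

-- ===== LEMMAS AND PROOFS =====

-- the if/elif chain of A, as a function on one part
def fixA (p : List Char) : List Char :=
  if PySem.Chars.startswith p "Merchant:".toList then "Merchant: Louis Badminton Store".toList
  else if PySem.Chars.startswith p "Category:".toList then "Category: Sports".toList
  else if PySem.Chars.startswith p "State:".toList then "State: WA".toList
  else p

lemma find_eq_of {s sub : List Char} {n : Nat} (h1 : sub <+: s.drop n)
    (h2 : ∀ i < n, ¬ sub <+: s.drop i) : PySem.Chars.find s sub = (n : Int) := by
  have hin : PySem.Chars.isIn sub s = true :=
    (PySem.Chars.exists_prefix_drop_iff_isIn sub s).mp ⟨n, h1⟩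
  have hnn : 0 ≤ PySem.Chars.find s sub :=
    (PySem.Chars.find_nonneg_iff s sub).mpr ((PySem.Chars.isIn_iff_infix sub s).mp hin)
  obtain ⟨hp, hmin⟩ := PySem.Chars.find_spec hnn
  have : (PySem.Chars.find s sub).toNat = n := by
    rcases Nat.lt_trichotomy (PySem.Chars.find s sub).toNat n with h | h | h
    · exact absurd hp (h2 _ h)
    · exact h
    · exact absurd h1 (hmin n h)
  omega

lemma find_cons {c : Char} {rest sub : List Char} (h : ¬ sub <+: (c :: rest)) :
    PySem.Chars.find (c :: rest) sub =
      (if PySem.Chars.find rest sub = -1 then -1 else PySem.Chars.find rest sub + 1) := by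
  split
  · rename_i h0
    rw [PySem.Chars.find_eq_neg_one_iff]
    intro hinf
    obtain ⟨j, hj⟩ := (PySem.Chars.exists_prefix_drop_iff_isIn sub _).mpr
      ((PySem.Chars.isIn_iff_infix sub _).mpr hinf)
    cases j with
    | zero => exact h (by simpa using hj)
    | succ j =>
        have hj' : sub <+: rest.drop j := by simpa using hj
        exact ((PySem.Chars.find_eq_neg_one_iff rest sub).mp h0)
          ((PySem.Chars.isIn_iff_infix sub rest).mp
            ((PySem.Chars.exists_prefix_drop_iff_isIn sub rest).mp ⟨j, hj'⟩))
  · rename_i h0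
    have hnn : 0 ≤ PySem.Chars.find rest sub := by
      have := PySem.Chars.neg_one_le_find rest sub
      omega
    obtain ⟨hp, hmin⟩ := PySem.Chars.find_spec hnn
    have := @find_eq_of (c :: rest) sub ((PySem.Chars.find rest sub).toNat + 1)
      (by simpa using hp)
      (by
        intro i hi
        cases i with
        | zero => simpa using h
        | succ i => intro hpre; exact hmin i (by omega) (by simpa using hpre))
    rw [this]; omega

def msp (cs : List Char) : List (List Char) :=
  if h : PySem.Chars.find cs ([' ', '-', ' '] : List Char) = -1 then [cs]
  else (cs.take (PySem.Chars.find cs ([' ', '-', ' '] : List Char)).toNat) ::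
       msp (cs.drop ((PySem.Chars.find cs ([' ', '-', ' '] : List Char)).toNat + 3))
termination_by cs.length
decreasing_by
  have hinf : ([' ', '-', ' '] : List Char) <:+: cs := (PySem.Chars.find_ne_neg_one_iff cs _).mp h
  have hlen := hinf.length_le
  simp at hlen ⊢
  omega

lemma msp_eq (cs : List Char) : msp cs =
    if PySem.Chars.find cs ([' ', '-', ' '] : List Char) = -1 then [cs]
    else (cs.take (PySem.Chars.find cs ([' ', '-', ' '] : List Char)).toNat) ::
         msp (cs.drop ((PySem.Chars.find cs ([' ', '-', ' '] : List Char)).toNat + 3)) := by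
  rw [msp]; split <;> rfl

lemma msp_ne_nil (cs : List Char) : msp cs ≠ [] := by
  rw [msp_eq]; split <;> simp

lemma goSpec : ∀ (fuel : Nat) (l cur : List Char) (acc : List (List Char)),
    l.length < fuel →
    PySem.Chars.splitOn.go ([' ', '-', ' '] : List Char) fuel l cur acc =
      acc.reverse ++ (msp l).modifyHead (fun p => cur.reverse ++ p) := by
  intro fuel
  induction fuel with
  | zero => intro l cur acc h; omega
  | succ fuel ih =>
    intro l cur acc h
    match l with
    | [] =>
        rw [PySem.Chars.splitOn.go]
        · rw [msp_eq []]
          norm_num [show PySem.Chars.find ([] : List Char) [' ', '-', ' '] = -1 from by decide]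
        · exact fun hc => absurd hc (by omega)
    | c :: rest =>
        rw [PySem.Chars.splitOn.go]
        by_cases hp : ([' ', '-', ' '] : List Char).isPrefixOf (c :: rest) = true
        · rw [if_pos hp]
          rw [ih _ _ _ (by simp at h ⊢; omega)]
          have hfind : PySem.Chars.find (c :: rest) [' ', '-', ' '] = 0 :=
            find_eq_of (n := 0) (by simpa using List.isPrefixOf_iff_prefix.mp hp) (by omega)
          rw [msp_eq (c :: rest), if_neg (by simp [hfind]), hfind]
          simp
          cases hmsp : msp (List.drop 2 rest) <;> simp
        · rw [if_neg hp]
          rw [ih _ _ _ (by simp at h ⊢; omega)]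
          have hnp : ¬ ([' ', '-', ' '] : List Char) <+: (c :: rest) :=
            fun hh => hp (List.isPrefixOf_iff_prefix.mpr hh)
          by_cases h0 : PySem.Chars.find rest [' ', '-', ' '] = -1
          · have hfind : PySem.Chars.find (c :: rest) [' ', '-', ' '] = -1 := by
              rw [find_cons hnp, if_pos h0]
            rw [msp_eq (c :: rest), if_pos hfind, msp_eq rest, if_pos h0]
            simp
          · have hnn : 0 ≤ PySem.Chars.find rest [' ', '-', ' '] := by
              have := PySem.Chars.neg_one_le_find rest [' ', '-', ' ']
              omega
            have hfind : PySem.Chars.find (c :: rest) [' ', '-', ' ']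
                = PySem.Chars.find rest [' ', '-', ' '] + 1 := by
              rw [find_cons hnp, if_neg h0]
            rw [msp_eq (c :: rest), if_neg (by omega), hfind, msp_eq rest, if_neg h0]
            have htn : (PySem.Chars.find rest [' ', '-', ' '] + 1).toNat
                = (PySem.Chars.find rest [' ', '-', ' ']).toNat + 1 := by omega
            rw [htn]
            simp

lemma splitOn_eq_msp (cs : List Char) :
    PySem.Chars.splitOn cs ([' ', '-', ' '] : List Char) = msp cs := by
  rw [PySem.Chars.splitOn, goSpec _ _ _ _ (by omega)]
  cases hmsp : msp cs <;> simp

lemma loopA : ∀ (xs pre : List (List Char)),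
    (PySem.List.enumerate xs (pre.length : Int)).foldl
      (fun ps ip =>
        if PySem.Chars.startswith ip.2 "Merchant:".toList then ps.set ip.1.toNat "Merchant: Louis Badminton Store".toList
        else if PySem.Chars.startswith ip.2 "Category:".toList then ps.set ip.1.toNat "Category: Sports".toList
        else if PySem.Chars.startswith ip.2 "State:".toList then ps.set ip.1.toNat "State: WA".toList
        else ps)
      (pre ++ xs) = pre ++ xs.map fixA := by
  intro xs
  induction xs with
  | nil => intro pre; simp [PySem.List.enumerate]
  | cons x t ih =>
      intro pre
      rw [PySem.List.enumerate, List.foldl_cons]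
      by_cases h1 : PySem.Chars.startswith x ['M','e','r','c','h','a','n','t',':'] = true
      · have hh := ih (pre ++ ["Merchant: Louis Badminton Store".toList])
        simp [fixA, h1] at hh ⊢
        exact hh
      · by_cases h2 : PySem.Chars.startswith x ['C','a','t','e','g','o','r','y',':'] = true
        · have hh := ih (pre ++ ["Category: Sports".toList])
          simp [fixA, h1, h2] at hh ⊢
          exact hh
        · by_cases h3 : PySem.Chars.startswith x ['S','t','a','t','e',':'] = true
          · have hh := ih (pre ++ ["State: WA".toList])
            simp [fixA, h1, h2, h3] at hh ⊢
            exact hh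
          · have hh := ih (pre ++ [x])
            simp [fixA, h1, h2, h3] at hh ⊢
            exact hh

-- ===== B-side lemmas =====

-- any label matched by rcMatch is a prefix of s that ends before the first " - ":
-- labels contain no space, so no occurrence of " - " can start inside one
lemma label_prefix_le {L s : List Char} {k : Nat} (hL : L <+: s)
    (hsp : ∀ c ∈ L, c ≠ ' ')
    (hk : ([' ', '-', ' '] : List Char) <+: s.drop k) : L.length ≤ k := by
  by_contra hlt
  have hlt : k < L.length := Nat.lt_of_not_le hlt
  obtain ⟨t, ht⟩ := hk
  have hsk : s[k]? = some ' ' := by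
    have : (s.drop k)[0]? = some ' ' := by rw [← ht]; rfl
    simpa using this
  obtain ⟨u, hu⟩ := hL
  have hLk : s[k]? = some L[k] := by
    rw [← hu, List.getElem?_append_left hlt]
    simp [hlt]
  have : L[k] = ' ' := by rw [hLk] at hsk; simpa using hsk
  exact hsp _ (List.getElem_mem _) this

lemma rcMatch_some {s repl : List Char} (h : rcMatch rcRules s = some repl) : fixA s = repl := by
  simp only [rcMatch, rcRules, fixA] at h ⊢
  split_ifs at h ⊢ <;> simp_all

lemma rcMatch_none {s : List Char} (h : rcMatch rcRules s = none) : fixA s = s := by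
  simp only [rcMatch, rcRules, fixA] at h ⊢
  split_ifs at h ⊢ <;> simp_all

lemma fixA_take_none {s : List Char} {k : Nat} (h : rcMatch rcRules s = none) :
    fixA (s.take k) = s.take k := by
  simp only [rcMatch, rcRules] at h
  split_ifs at h with h1 h2 h3
  rw [fixA]
  rw [if_neg (fun hc => h1 (by
        rw [PySem.Chars.startswith_iff] at hc ⊢
        exact hc.trans (List.take_prefix _ _)))]
  rw [if_neg (fun hc => h2 (by
        rw [PySem.Chars.startswith_iff] at hc ⊢
        exact hc.trans (List.take_prefix _ _)))]
  rw [if_neg (fun hc => h3 (by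
        rw [PySem.Chars.startswith_iff] at hc ⊢
        exact hc.trans (List.take_prefix _ _)))]

lemma fixA_take_some {s repl : List Char} {k : Nat} (h : rcMatch rcRules s = some repl)
    (hk : ([' ', '-', ' '] : List Char) <+: s.drop k) :
    fixA (s.take k) = repl := by
  simp only [rcMatch, rcRules] at h
  have hpre : ∀ {L : List Char}, PySem.Chars.startswith s L = true →
      (∀ c ∈ L, c ≠ ' ') → PySem.Chars.startswith (s.take k) L = true := by
    intro L hs hsp
    rw [PySem.Chars.startswith_iff] at hs ⊢
    have hle := label_prefix_le hs hsp hk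
    exact List.prefix_take_iff.mpr ⟨hs, hle⟩
  have hneg : ∀ {L : List Char}, ¬ PySem.Chars.startswith s L = true →
      ¬ PySem.Chars.startswith (s.take k) L = true := by
    intro L hs hc
    rw [PySem.Chars.startswith_iff] at hc
    exact hs ((PySem.Chars.startswith_iff _ _).mpr (hc.trans (List.take_prefix _ _)))
  split_ifs at h with h1 h2 h3
  · rw [fixA, if_pos (hpre h1 (by simp))]
    exact Option.some.inj h
  · rw [fixA, if_neg (hneg h1), if_pos (hpre h2 (by simp))]
    exact Option.some.inj h
  · rw [fixA, if_neg (hneg h1), if_neg (hneg h2),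
        if_pos (hpre h3 (by simp))]
    exact Option.some.inj h

-- B's loop in non-boundary mode: skipping drops, copying keeps, up to the next " - "
lemma rcLoop_mode : ∀ (t : List Char) (sk : Bool),
    rcLoop t false sk =
      if PySem.Chars.find t ([' ', '-', ' '] : List Char) = -1 then (if sk then [] else t)
      else (if sk then [] else t.take (PySem.Chars.find t ([' ', '-', ' '] : List Char)).toNat) ++
           ([' ', '-', ' '] : List Char) ++
           rcLoop (t.drop ((PySem.Chars.find t ([' ', '-', ' '] : List Char)).toNat + 3)) true false := by
  intro t
  induction t with
  | nil => intro sk; simp [rcLoop, show PySem.Chars.find ([] : List Char) [' ', '-', ' '] = -1 from by decide]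
  | cons c r ih =>
      intro sk
      have hsep : " - ".toList = ([' ', '-', ' '] : List Char) := by decide
      by_cases hp : ([' ', '-', ' '] : List Char) <+: (c :: r)
      · have hsw : PySem.Chars.startswith (c :: r) " - ".toList = true := by
          rw [PySem.Chars.startswith_iff, hsep]; exact hp
        have hfind : PySem.Chars.find (c :: r) [' ', '-', ' '] = 0 :=
          find_eq_of (n := 0) (by simpa using hp) (by omega)
        rw [rcLoop, if_pos hsw, hfind]
        cases sk <;> simp [hsep]
      · have hsw : PySem.Chars.startswith (c :: r) " - ".toList = false := by
          rw [Bool.eq_false_iff]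
          intro hc; exact hp (by rw [PySem.Chars.startswith_iff, hsep] at hc; exact hc)
        have hswl : PySem.Chars.startswith (c :: r) ([' ', '-', ' '] : List Char) = false := by
          rw [← hsep]; exact hsw
        rw [rcLoop, if_neg (by simp [hswl])]
        simp only [if_neg Bool.false_ne_true]
        by_cases h0 : PySem.Chars.find r [' ', '-', ' '] = -1
        · have hfind : PySem.Chars.find (c :: r) [' ', '-', ' '] = -1 := by
            rw [find_cons hp, if_pos h0]
          rw [if_pos hfind]
          cases sk <;> simp [ih, h0]
        · have hnn : 0 ≤ PySem.Chars.find r [' ', '-', ' '] := by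
            have := PySem.Chars.neg_one_le_find r [' ', '-', ' ']
            omega
          have hfind : PySem.Chars.find (c :: r) [' ', '-', ' ']
              = PySem.Chars.find r [' ', '-', ' '] + 1 := by
            rw [find_cons hp, if_neg h0]
          have hne : ¬ PySem.Chars.find (c :: r) [' ', '-', ' '] = -1 := by omega
          rw [if_neg hne, hfind]
          have htn : (PySem.Chars.find r [' ', '-', ' '] + 1).toNat
              = (PySem.Chars.find r [' ', '-', ' ']).toNat + 1 := by omega
          rw [htn]
          cases sk <;> simp [ih, h0]

-- B's loop at a part boundary produces exactly A's fixed parts joined by " - "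
lemma rcLoop_boundary (cs : List Char) :
    rcLoop cs true false =
      PySem.Chars.join ([' ', '-', ' '] : List Char) ((msp cs).map fixA) := by
  have hsep : " - ".toList = ([' ', '-', ' '] : List Char) := by decide
  induction cs using msp.induct with
  | case1 cs hfind =>
      rw [msp_eq cs, if_pos hfind]
      match cs with
      | [] => rw [rcLoop]; decide
      | c :: r =>
          have hp : ¬ ([' ', '-', ' '] : List Char) <+: (c :: r) := by
            intro hc
            have h00 := find_eq_of (n := 0) (s := c :: r) (sub := ([' ', '-', ' '] : List Char))
              (by rw [List.drop_zero]; exact hc) (fun i hi => absurd hi (Nat.not_lt_zero i))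
            omega
          have hswl : PySem.Chars.startswith (c :: r) ([' ', '-', ' '] : List Char) = false := by
            rw [Bool.eq_false_iff]
            intro hc; exact hp ((PySem.Chars.startswith_iff _ _).mp hc)
          have h0 : PySem.Chars.find r [' ', '-', ' '] = -1 := by
            rw [PySem.Chars.find_eq_neg_one_iff]
            intro hinf
            exact (PySem.Chars.find_eq_neg_one_iff _ _).mp hfind
              (hinf.trans (List.suffix_cons c r).isInfix)
          have hskip : rcLoop r false true = [] := by
            rw [rcLoop_mode, if_pos h0]; simp
          have hcopy : rcLoop r false false = r := by
            rw [rcLoop_mode, if_pos h0]; simp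
          rw [rcLoop, if_neg (by simp [hswl])]
          cases hm : rcMatch rcRules (c :: r) with
          | some repl =>
              simp only [if_pos rfl, hm]
              simp [hskip, rcMatch_some hm, PySem.Chars.join_singleton]
          | none =>
              simp only [if_pos rfl, hm]
              simp [hcopy, rcMatch_none hm, PySem.Chars.join_singleton]
  | case2 cs hfind ih =>
      have hnn : 0 ≤ PySem.Chars.find cs [' ', '-', ' '] := by
        have := PySem.Chars.neg_one_le_find cs [' ', '-', ' ']
        omega
      obtain ⟨hk, -⟩ := PySem.Chars.find_spec hnn
      rw [msp_eq cs, if_neg hfind]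
      obtain ⟨q, l, hql⟩ : ∃ q l, msp (cs.drop ((PySem.Chars.find cs [' ', '-', ' ']).toNat + 3)) = q :: l := by
        rcases hm : msp (cs.drop ((PySem.Chars.find cs [' ', '-', ' ']).toNat + 3)) with _ | ⟨q, l⟩
        · exact absurd hm (msp_ne_nil _)
        · exact ⟨q, l, rfl⟩
      match cs with
      | [] => exact absurd (by decide) hfind
      | c :: r =>
          have hfn : fixA [] = [] := by decide
          by_cases hp : ([' ', '-', ' '] : List Char) <+: (c :: r)
          · have hf0 : PySem.Chars.find (c :: r) [' ', '-', ' '] = 0 :=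
              find_eq_of (n := 0) (by rw [List.drop_zero]; exact hp)
                (fun i hi => absurd hi (Nat.not_lt_zero i))
            have hsw : PySem.Chars.startswith (c :: r) " - ".toList = true := by
              rw [PySem.Chars.startswith_iff, hsep]; exact hp
            have h3 : ((PySem.Chars.find (c :: r) [' ', '-', ' ']).toNat + 3) = 3 := by
              rw [hf0]; rfl
            rw [rcLoop, if_pos hsw, hsep]
            rw [h3] at ih hql ⊢
            rw [ih, hql, hf0]
            simp [PySem.Chars.join_cons_cons, hfn]
          · have hswl : PySem.Chars.startswith (c :: r) ([' ', '-', ' '] : List Char) = false := by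
              rw [Bool.eq_false_iff]
              intro hc; exact hp ((PySem.Chars.startswith_iff _ _).mp hc)
            have h0 : ¬ PySem.Chars.find r [' ', '-', ' '] = -1 := by
              intro h0
              exact hfind (by rw [find_cons hp, if_pos h0])
            have hrn : 0 ≤ PySem.Chars.find r [' ', '-', ' '] := by
              have := PySem.Chars.neg_one_le_find r [' ', '-', ' ']
              omega
            have hfc : PySem.Chars.find (c :: r) [' ', '-', ' ']
                = PySem.Chars.find r [' ', '-', ' '] + 1 := by
              rw [find_cons hp, if_neg h0]
            have htn : (PySem.Chars.find (c :: r) [' ', '-', ' ']).toNat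
                = (PySem.Chars.find r [' ', '-', ' ']).toNat + 1 := by omega
            have hdropeq : r.drop ((PySem.Chars.find r [' ', '-', ' ']).toNat + 3)
                = (c :: r).drop ((PySem.Chars.find (c :: r) [' ', '-', ' ']).toNat + 3) := by
              rw [htn]; rfl
            have hskip : rcLoop r false true
                = [' ', '-', ' '] ++ rcLoop (r.drop ((PySem.Chars.find r [' ', '-', ' ']).toNat + 3)) true false := by
              rw [rcLoop_mode, if_neg h0]; simp
            have hcopy : rcLoop r false false
                = r.take (PySem.Chars.find r [' ', '-', ' ']).toNat ++ [' ', '-', ' ']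
                  ++ rcLoop (r.drop ((PySem.Chars.find r [' ', '-', ' ']).toNat + 3)) true false := by
              rw [rcLoop_mode, if_neg h0]; simp
            rw [rcLoop, if_neg (by simp [hswl])]
            cases hm : rcMatch rcRules (c :: r) with
            | some repl =>
                simp only [if_pos rfl, hm]
                rw [hskip, hdropeq, ih, hql]
                simp [PySem.Chars.join_cons_cons, fixA_take_some hm hk]
            | none =>
                simp only [if_pos rfl, hm]
                rw [hcopy, hdropeq, ih, hql]
                have hfixn := fixA_take_none (s := c :: r)
                  (k := (PySem.Chars.find (c :: r) [' ', '-', ' ']).toNat) hm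
                rw [htn, List.take_succ_cons] at hfixn
                simp [PySem.Chars.join_cons_cons, hfixn, htn, List.take_succ_cons]

-- ===== VERDICT (by name: the statement is the Claim_ definition above) =====
theorem revise_conversation_spec : Claim_equal_revise_conversation := by
  intro conversation _
  unfold Spec_revise_conversation revise_conversation revise_conversation_alt
  have hsep : " - ".toList = ([' ', '-', ' '] : List Char) := by decide
  have h := loopA (PySem.Chars.splitOn conversation.toList ([' ', '-', ' '] : List Char)) []
  simp only [List.length_nil, Nat.cast_zero, List.nil_append] at h
  simp only [hsep]
  rw [h, rcLoop_boundary, splitOn_eq_msp]
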